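-- pv_equiv track=rewrite | github.com/KristynaHel/junior.guru | juniorguru/cli/sync.py | get_parallel_chains
-- ===== SOURCE A (Python) =====
-- def get_parallel_chains(dependencies_map, exclude=None):
--     exclude = exclude or []
--     temp_chains = {name: set([name] +
--                              [c for c in deps if c not in exclude])
--                    for name, deps
--                    in dependencies_map.items()
--                    if name not in exclude}
--     chains = {}
--     while True:
--         seen_names = []
--         for name, chain in temp_chains.items():
--             if name not in seen_names:
--                 seen_names.append(name)
--                 for other_name, other_chain in temp_chains.items():
--                     if other_name not in seen_names and other_chain & chain:
--                         chain |= other_chain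
--                         seen_names.append(other_name)
--                 chains[name] = chain
--         if len(chains) == len(temp_chains):
--             return sorted(map(sorted, chains.values()))
--         temp_chains = chains
--         chains = {}
-- ===== SOURCE B (Python) =====
-- def get_parallel_chains(dependencies_map, exclude=None):
--     excluded = set(exclude or [])
--     components = []  # pairwise-disjoint sets, one per connected component so far
--     for name, deps in dependencies_map.items():
--         if name in excluded:
--             continue
--         group = {name}
--         group.update(d for d in deps if d not in excluded)
--         touching = [c for c in components if c & group]
--         rest = [c for c in components if not (c & group)]
--         for c in touching:
--             group |= c
--         components = rest + [group]
--     return sorted(map(sorted, components))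
-- ===== Notes on version B (the rewrite author's own statement) =====
-- stated objective: faster
-- what changed: Replaces A's repeated fixpoint passes over a dict of chains (each pass a double loop over temp_chains.items() with a linear 'name not in seen_names' list scan inside) by a single incremental pass that maintains a list of pairwise-disjoint components and merges each key's dependency set into every component it touches.
import Mathlib
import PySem

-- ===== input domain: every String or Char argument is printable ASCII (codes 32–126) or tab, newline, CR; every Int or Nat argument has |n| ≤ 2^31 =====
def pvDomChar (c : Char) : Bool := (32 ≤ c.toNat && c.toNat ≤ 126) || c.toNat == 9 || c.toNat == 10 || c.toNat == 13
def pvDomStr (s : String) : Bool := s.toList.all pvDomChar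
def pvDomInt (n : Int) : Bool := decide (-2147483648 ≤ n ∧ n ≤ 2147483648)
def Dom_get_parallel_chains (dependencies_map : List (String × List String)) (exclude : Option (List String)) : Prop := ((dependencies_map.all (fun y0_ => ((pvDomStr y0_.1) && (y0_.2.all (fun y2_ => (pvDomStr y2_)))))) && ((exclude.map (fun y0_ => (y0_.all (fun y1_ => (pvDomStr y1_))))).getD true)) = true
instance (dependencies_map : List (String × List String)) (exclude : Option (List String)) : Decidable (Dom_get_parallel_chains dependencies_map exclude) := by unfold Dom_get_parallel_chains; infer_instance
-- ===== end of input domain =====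

-- B replaces A's repeated full merge passes (each with a linear `seen_names` scan inside a double
-- loop) by a single incremental pass over a list of pairwise-disjoint components; objective: faster.

-- ===== PORT A =====

-- shared with port B: reading the dict argument, one key's dependency set,
-- and the final sorted(map(sorted, …)) — boundary conversions both Pythons perform.
def pvItems (dm : List (String × List String)) : List (String × List String) :=
  (PySem.Dict.ofList dm).items

def pvGroup (ex : List String) (p : String × List String) : PySem.Set String :=
  PySem.Set.ofList (p.1 :: p.2.filter (fun c => !ex.contains c))

def pvSortOut (vals : List (List String)) : List (List String) :=
  PySem.List.sorted (vals.map (fun c => PySem.List.sorted c (fun x => x) false)) (fun x => x) false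

-- temp_chains = {name: set([name] + [c for c in deps if c not in exclude]) … if name not in exclude}
def pvTemp (ex : List String) (items : List (String × List String)) :
    PySem.Dict String (List String) :=
  PySem.Dict.ofList ((items.filter (fun p => !ex.contains p.1)).map (fun p => (p.1, pvGroup ex p)))

-- the inner `for other_name, other_chain in temp_chains.items(): …` loop (state: chain, seen_names)
def pvInner (scan : List (String × List String)) (chain : List String) (seen : List String) :
    List String × List String :=
  scan.foldl
    (fun st q =>
      if !st.2.contains q.1 && !(PySem.Set.inter q.2 st.1).isEmpty then
        (PySem.Set.union st.1 q.2, st.2 ++ [q.1])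
      else st)
    (chain, seen)

-- the outer `for name, chain in temp_chains.items(): …` body (state: seen_names, chains)
def pvPassStep (scan : List (String × List String))
    (st : List String × PySem.Dict String (List String)) (p : String × List String) :
    List String × PySem.Dict String (List String) :=
  if st.1.contains p.1 then st
  else
    let r := pvInner scan p.2 (st.1 ++ [p.1])
    (r.2, st.2.insert p.1 r.1)

-- one iteration of the `while True` body, producing `chains`
def pvPass (tc : PySem.Dict String (List String)) : PySem.Dict String (List String) :=
  (tc.items.foldl (pvPassStep tc.items) ([], PySem.Dict.empty)).2

-- (termination infrastructure for the `while True` port: one pass never enlarges the dict)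
theorem pvInner_cons (q : String × List String) (r : List (String × List String))
    (chain seen : List String) :
    pvInner (q :: r) chain seen =
      if !seen.contains q.1 && !(PySem.Set.inter q.2 chain).isEmpty then
        pvInner r (PySem.Set.union chain q.2) (seen ++ [q.1])
      else pvInner r chain seen := by
  simp only [pvInner, List.foldl_cons]
  split <;> rfl

theorem pvInner_seen_mono (scan : List (String × List String)) :
    ∀ (chain seen : List String), ∃ a, (pvInner scan chain seen).2 = seen ++ a := by
  induction scan with
  | nil => exact fun chain seen => ⟨[], by simp [pvInner]⟩
  | cons q r ih =>
    intro chain seen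
    rw [pvInner_cons]
    split
    · obtain ⟨a, ha⟩ := ih (PySem.Set.union chain q.2) (seen ++ [q.1])
      exact ⟨[q.1] ++ a, by rw [ha, List.append_assoc]⟩
    · exact ih chain seen

theorem pvPassAux (scan : List (String × List String)) :
    ∀ (L : List (String × List String)) (seen : List String) (d : PySem.Dict String (List String)),
    d.keys.Nodup → (∀ k ∈ d.keys, k ∈ seen) →
    ((L.foldl (pvPassStep scan) (seen, d)).2.keys.Nodup ∧
      (∀ k ∈ (L.foldl (pvPassStep scan) (seen, d)).2.keys,
        k ∈ (L.foldl (pvPassStep scan) (seen, d)).1) ∧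
      (L.foldl (pvPassStep scan) (seen, d)).2.size ≤ d.size + L.length) := by
  intro L
  induction L with
  | nil => intro seen d h1 h2; exact ⟨h1, h2, by simp⟩
  | cons p t ih =>
    intro seen d h1 h2
    simp only [List.foldl_cons]
    by_cases hp : seen.contains p.1 = true
    · have hstep : pvPassStep scan (seen, d) p = (seen, d) := by
        unfold pvPassStep
        rw [if_pos hp]
      rw [hstep]
      obtain ⟨a1, a2, a3⟩ := ih seen d h1 h2
      exact ⟨a1, a2, by simp only [List.length_cons]; omega⟩
    · have hpm : p.1 ∉ seen := fun hm => hp (List.contains_iff_mem.mpr hm)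
      have hpk : d.contains p.1 = false := by
        cases hck : d.contains p.1
        · rfl
        · exact absurd (h2 _ ((PySem.Dict.contains_iff_mem_keys d p.1).mp hck)) hpm
      have hstep : pvPassStep scan (seen, d) p
          = ((pvInner scan p.2 (seen ++ [p.1])).2,
             d.insert p.1 (pvInner scan p.2 (seen ++ [p.1])).1) := by
        unfold pvPassStep
        rw [if_neg hp]
      rw [hstep]
      obtain ⟨a, ha⟩ := pvInner_seen_mono scan p.2 (seen ++ [p.1])
      have hkeys : (d.insert p.1 (pvInner scan p.2 (seen ++ [p.1])).1).keys = d.keys ++ [p.1] :=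
        PySem.Dict.keys_insert_of_not_contains d _ hpk
      have hnotmem : p.1 ∉ d.keys := fun hm =>
        (by simp [(PySem.Dict.contains_iff_mem_keys d p.1).mpr hm] at hpk)
      have hnd : (d.insert p.1 (pvInner scan p.2 (seen ++ [p.1])).1).keys.Nodup := by
        rw [hkeys, List.nodup_append]
        refine ⟨h1, List.nodup_singleton _, ?_⟩
        intro a ha b hb
        rw [List.mem_singleton] at hb
        subst hb
        exact fun heq => hnotmem (heq ▸ ha)
      have hsub : ∀ k ∈ (d.insert p.1 (pvInner scan p.2 (seen ++ [p.1])).1).keys,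
          k ∈ (pvInner scan p.2 (seen ++ [p.1])).2 := by
        intro k hk
        rw [hkeys] at hk
        rw [ha]
        rcases List.mem_append.mp hk with hk | hk
        · exact List.mem_append.mpr (Or.inl (List.mem_append.mpr (Or.inl (h2 _ hk))))
        · exact List.mem_append.mpr (Or.inl (List.mem_append.mpr (Or.inr hk)))
      have hsz : (d.insert p.1 (pvInner scan p.2 (seen ++ [p.1])).1).size = d.size + 1 := by
        show (d.insert p.1 (pvInner scan p.2 (seen ++ [p.1])).1).items.length = d.items.length + 1
        rw [PySem.Dict.items_insert_of_not_contains d _ hpk]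
        simp
      obtain ⟨a1, a2, a3⟩ := ih _ _ hnd hsub
      refine ⟨a1, a2, ?_⟩
      rw [hsz] at a3
      simp only [List.length_cons]
      omega

theorem pvPass_size_le (tc : PySem.Dict String (List String)) : (pvPass tc).size ≤ tc.size := by
  have h := (pvPassAux tc.items tc.items [] PySem.Dict.empty (by simp) (by simp)).2.2
  simpa [pvPass] using h

-- the `while True:` loop
def pvLoop (tc : PySem.Dict String (List String)) : List (List String) :=
  let chains := pvPass tc
  if chains.size = tc.size then pvSortOut chains.values
  else pvLoop chains
termination_by tc.size
decreasing_by
  have h := pvPass_size_le tc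
  simp only [chains] at *
  omega

def get_parallel_chains (dependencies_map : List (String × List String))
    (exclude : Option (List String)) : List (List String) :=
  let ex := exclude.getD []
  pvLoop (pvTemp ex (pvItems dependencies_map))

-- ===== PORT B =====

-- fold one group into the list of pairwise-disjoint components
def pvMergeInto (comps : List (List String)) (g : List String) : List (List String) :=
  let touching := comps.filter (fun c => !(PySem.Set.inter c g).isEmpty)
  let rest := comps.filter (fun c => (PySem.Set.inter c g).isEmpty)
  rest ++ [touching.foldl (fun acc c => PySem.Set.union acc c) g]

def get_parallel_chains_alt (dependencies_map : List (String × List String))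
    (exclude : Option (List String)) : List (List String) :=
  let ex := exclude.getD []
  pvSortOut
    ((pvItems dependencies_map).foldl
      (fun comps p => if ex.contains p.1 then comps else pvMergeInto comps (pvGroup ex p)) [])

-- ===== PRECONDITION & SPEC =====
def Spec_get_parallel_chains (dependencies_map : List (String × List String)) (exclude : Option (List String)) (out : List (List String)) : Prop := out = get_parallel_chains_alt dependencies_map exclude
instance (dependencies_map : List (String × List String)) (exclude : Option (List String)) (out : List (List String)) : Decidable (Spec_get_parallel_chains dependencies_map exclude out) := by unfold Spec_get_parallel_chains; infer_instance

-- ===== CLAIM (what is proved, stated in full; the proofs are below) =====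
def Claim_equal_get_parallel_chains : Prop := ∀ (dependencies_map : List (String × List String)) (exclude : Option (List String)), Dom_get_parallel_chains dependencies_map exclude → Spec_get_parallel_chains dependencies_map exclude (get_parallel_chains dependencies_map exclude)

-- ===== LEMMAS AND PROOFS =====

-- `s` is a union of a connected subfamily of the base sets F
inductive pvConn (F : List (Finset String)) : Finset String → Prop
  | base {s : Finset String} : s ∈ F → pvConn F s
  | merge {s t : Finset String} : pvConn F s → pvConn F t → (s ∩ t).Nonempty → pvConn F (s ∪ t)

-- the properties that pin the result partition down uniquely
def pvGood (F : List (Finset String)) (P : List (List String)) : Prop :=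
  (∀ c ∈ P, c.Nodup) ∧ (∀ c ∈ P, pvConn F c.toFinset) ∧
  (P.map (fun c => c.toFinset)).Pairwise (fun a b => Disjoint a b) ∧
  (∀ f ∈ F, ∃ c ∈ P, f ⊆ c.toFinset)

-- ---- bridges between PySem list-sets and Finsets ----

theorem pvInterEmpty_iff (a b : List String) :
    ((PySem.Set.inter a b).isEmpty = true) ↔ Disjoint a.toFinset b.toFinset := by
  rw [List.isEmpty_iff, List.eq_nil_iff_forall_not_mem, Finset.disjoint_left]
  constructor
  · intro h x hx1 hx2
    exact h x ((PySem.Set.mem_inter a b x).mpr ⟨List.mem_toFinset.mp hx1, List.mem_toFinset.mp hx2⟩)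
  · intro h x hx
    rw [PySem.Set.mem_inter] at hx
    exact h (List.mem_toFinset.mpr hx.1) (List.mem_toFinset.mpr hx.2)

theorem pvUnion_toFinset (a b : List String) :
    (PySem.Set.union a b).toFinset = a.toFinset ∪ b.toFinset := by
  ext x
  simp [PySem.Set.mem_union]

-- ---- uniqueness of a pvGood partition ----

theorem pvConn_nonempty {F : List (Finset String)} (hne : ∀ f ∈ F, f.Nonempty)
    {s : Finset String} (h : pvConn F s) : s.Nonempty := by
  induction h with
  | base hs => exact hne _ hs
  | merge h1 h2 hint ih1 ih2 => exact ih1.mono Finset.subset_union_left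

theorem pvDisjoint_eq {P : List (Finset String)} (hP : P.Pairwise (fun a b => Disjoint a b))
    {a b : Finset String} (ha : a ∈ P) (hb : b ∈ P) (h : ¬ Disjoint a b) : a = b := by
  by_contra hne
  exact h (hP.forall (fun _ _ hxy => Disjoint.symm hxy) ha hb hne)

theorem pvConn_subset {F : List (Finset String)} {Q : List (List String)} (hQ : pvGood F Q)
    {s : Finset String} (h : pvConn F s) : ∃ q ∈ Q, s ⊆ q.toFinset := by
  obtain ⟨hnd, hconn, hdisj, hcov⟩ := hQ
  induction h with
  | base hs => exact hcov _ hs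
  | merge h1 h2 hint ih1 ih2 =>
    obtain ⟨q1, hq1, hs1⟩ := ih1
    obtain ⟨q2, hq2, hs2⟩ := ih2
    obtain ⟨x, hx⟩ := hint
    have hnd2 : ¬ Disjoint q1.toFinset q2.toFinset := by
      rw [Finset.not_disjoint_iff]
      exact ⟨x, hs1 (Finset.mem_inter.mp hx).1, hs2 (Finset.mem_inter.mp hx).2⟩
    have heq := pvDisjoint_eq hdisj (List.mem_map_of_mem hq1) (List.mem_map_of_mem hq2) hnd2
    refine ⟨q1, hq1, Finset.union_subset hs1 ?_⟩
    rw [heq]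
    exact hs2

theorem pvGood_blocks_eq {F : List (Finset String)} (hne : ∀ f ∈ F, f.Nonempty)
    {P Q : List (List String)} (hP : pvGood F P) (hQ : pvGood F Q) :
    ∀ b, b ∈ P.map (fun c => c.toFinset) ↔ b ∈ Q.map (fun c => c.toFinset) := by
  have aux : ∀ (P' Q' : List (List String)), pvGood F P' → pvGood F Q' →
      ∀ b ∈ P'.map (fun c => c.toFinset), b ∈ Q'.map (fun c => c.toFinset) := by
    intro P' Q' hP' hQ' b hb
    obtain ⟨c, hc, rfl⟩ := List.mem_map.mp hb
    obtain ⟨q, hq, hsub1⟩ := pvConn_subset hQ' (hP'.2.1 c hc)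
    obtain ⟨p', hp', hsub2⟩ := pvConn_subset hP' (hQ'.2.1 q hq)
    have hcne := pvConn_nonempty hne (hP'.2.1 c hc)
    have hndis : ¬ Disjoint c.toFinset p'.toFinset := by
      rw [Finset.not_disjoint_iff]
      obtain ⟨x, hx⟩ := hcne
      exact ⟨x, hx, hsub2 (hsub1 hx)⟩
    have heq := pvDisjoint_eq hP'.2.2.1 (List.mem_map_of_mem hc) (List.mem_map_of_mem hp') hndis
    rw [← heq] at hsub2
    have : c.toFinset = q.toFinset := Finset.Subset.antisymm hsub1 hsub2
    rw [this]
    exact List.mem_map_of_mem hq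
  exact fun b => ⟨aux P Q hP hQ b, aux Q P hQ hP b⟩

theorem pvGood_blocks_nodup {F : List (Finset String)} (hne : ∀ f ∈ F, f.Nonempty)
    {P : List (List String)} (hP : pvGood F P) : (P.map (fun c => c.toFinset)).Nodup := by
  have : (P.map (fun c => c.toFinset)).Pairwise (· ≠ ·) := by
    refine hP.2.2.1.imp_of_mem ?_
    intro a b ha hb hd heq
    obtain ⟨c, hc, rfl⟩ := List.mem_map.mp ha
    have hne' := pvConn_nonempty hne (hP.2.1 c hc)
    rw [← heq] at hd
    exact hne'.ne_empty (by simpa using disjoint_self.mp hd)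
  exact this

theorem pvSorted_of_nodup {c : List String} (h : c.Nodup) :
    PySem.List.sorted c (fun x => x) false = c.toFinset.sort (· ≤ ·) := by
  refine PySem.List.sorted_eq_of_perm_of_pairwise_lt c (c.toFinset.sort (· ≤ ·)) (fun x => x) ?_ ?_
  · exact (Finset.sort_perm_toList _ _).trans (List.toFinset_toList h)
  · have h2 := Finset.sortedLT_sort c.toFinset
    rw [List.sortedLT_iff_pairwise] at h2
    exact h2

theorem pvSortOut_eq_of_good (F : List (Finset String)) (hne : ∀ f ∈ F, f.Nonempty)
    (P Q : List (List String)) (hP : pvGood F P) (hQ : pvGood F Q) :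
    pvSortOut P = pvSortOut Q := by
  unfold pvSortOut
  have hmP : P.map (fun c => PySem.List.sorted c (fun x => x) false)
      = (P.map (fun c => c.toFinset)).map (fun f => f.sort (· ≤ ·)) := by
    rw [List.map_map]
    exact List.map_congr_left (fun c hc => pvSorted_of_nodup (hP.1 c hc))
  have hmQ : Q.map (fun c => PySem.List.sorted c (fun x => x) false)
      = (Q.map (fun c => c.toFinset)).map (fun f => f.sort (· ≤ ·)) := by
    rw [List.map_map]
    exact List.map_congr_left (fun c hc => pvSorted_of_nodup (hQ.1 c hc))
  rw [hmP, hmQ]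
  have h1 : (fun (a b : List String) => a.decidableLT b)
      = (LinearOrder.toDecidableLT : DecidableLT (List String)) := Subsingleton.elim _ _
  rw [h1]
  refine PySem.List.sorted_eq_sorted_of_perm _ _ (fun x : List String => x) (fun a b h => h) ?_
  refine List.Perm.map _ ?_
  rw [List.perm_ext_iff_of_nodup (pvGood_blocks_nodup hne hP) (pvGood_blocks_nodup hne hQ)]
  exact pvGood_blocks_eq hne hP hQ

-- ---- the list-level description of one pass of A ----

def pvAbsorb (chain : List String) : List (String × List String) →
    List String × List (String × List String)
  | [] => (chain, [])
  | q :: r =>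
    if !(PySem.Set.inter q.2 chain).isEmpty then pvAbsorb (PySem.Set.union chain q.2) r
    else
      let t := pvAbsorb chain r
      (t.1, q :: t.2)

def pvAbsNames (chain : List String) : List (String × List String) → List String
  | [] => []
  | q :: r =>
    if !(PySem.Set.inter q.2 chain).isEmpty then q.1 :: pvAbsNames (PySem.Set.union chain q.2) r
    else pvAbsNames chain r

theorem pvAbsorb_kept_sublist (chain : List String) (r : List (String × List String)) :
    (pvAbsorb chain r).2.Sublist r := by
  induction r generalizing chain with
  | nil => simp [pvAbsorb]
  | cons q r ih =>
    simp only [pvAbsorb]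
    split
    · exact (ih _).cons q
    · exact (ih chain).cons₂ q

def pvMergePass : List (String × List String) → List (String × List String)
  | [] => []
  | p :: r => (p.1, (pvAbsorb p.2 r).1) :: pvMergePass (pvAbsorb p.2 r).2
termination_by l => l.length
decreasing_by
  have := (pvAbsorb_kept_sublist p.2 r).length_le
  simp; omega

theorem pvAbsNames_mem {chain : List String} {r : List (String × List String)} {x : String}
    (h : x ∈ pvAbsNames chain r) : x ∈ r.map Prod.fst := by
  induction r generalizing chain with
  | nil => cases h
  | cons q r ih =>
    simp only [List.map_cons]
    simp only [pvAbsNames] at h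
    split at h
    · rcases List.mem_cons.mp h with rfl | h2
      · exact List.mem_cons_self ..
      · exact List.mem_cons_of_mem _ (ih h2)
    · exact List.mem_cons_of_mem _ (ih h)

theorem pvAbsorb_kept_eq_filter (chain : List String) (r : List (String × List String))
    (hN : (r.map Prod.fst).Nodup) :
    (pvAbsorb chain r).2 = r.filter (fun q => !(pvAbsNames chain r).contains q.1) := by
  induction r generalizing chain with
  | nil => simp [pvAbsorb, pvAbsNames]
  | cons q r ih =>
    simp only [List.map_cons, List.nodup_cons] at hN
    obtain ⟨hq, hNr⟩ := hN
    by_cases hint : (!(PySem.Set.inter q.2 chain).isEmpty) = true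
    · simp only [pvAbsorb, pvAbsNames, if_pos hint]
      rw [List.filter_cons]
      have hhead : (!((q.1 :: pvAbsNames (PySem.Set.union chain q.2) r).contains q.1)) = false := by
        simp
      rw [hhead]
      simp only [Bool.false_eq_true, if_false]
      rw [ih _ hNr]
      refine List.filter_congr ?_
      intro p hp
      have hne : p.1 ≠ q.1 := fun he => hq (he ▸ List.mem_map_of_mem hp)
      simp [hne]
    · simp only [pvAbsorb, pvAbsNames, if_neg hint]
      have hqa : ((pvAbsNames chain r).contains q.1) = false := by
        cases hc : (pvAbsNames chain r).contains q.1
        · rfl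
        · exact absurd (pvAbsNames_mem (List.contains_iff_mem.mp hc)) hq
      rw [List.filter_cons]
      simp only [hqa, Bool.not_false, if_true]
      exact congrArg (q :: ·) (ih _ hNr)

theorem pvInner_spec (L : List (String × List String)) (hN : (L.map Prod.fst).Nodup) :
    ∀ (chain seen : List String),
    pvInner L chain seen =
      ((pvAbsorb chain (L.filter (fun q => !seen.contains q.1))).1,
        seen ++ pvAbsNames chain (L.filter (fun q => !seen.contains q.1))) := by
  induction L with
  | nil => intro chain seen; simp [pvInner, pvAbsorb, pvAbsNames]
  | cons q r ih =>
    simp only [List.map_cons, List.nodup_cons] at hN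
    obtain ⟨hq, hNr⟩ := hN
    intro chain seen
    rw [pvInner_cons]
    by_cases hseen : seen.contains q.1 = true
    · have hf : (!seen.contains q.1) = false := by rw [hseen]; rfl
      have hcond : (!seen.contains q.1 && !(PySem.Set.inter q.2 chain).isEmpty) = false := by
        rw [hf]; rfl
      rw [hcond]
      simp only [Bool.false_eq_true, if_false]
      rw [List.filter_cons, hf]
      simp only [Bool.false_eq_true, if_false]
      exact ih hNr chain seen
    · have hsm : q.1 ∉ seen := fun hm => hseen (List.contains_iff_mem.mpr hm)
      have hcf : seen.contains q.1 = false := by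
        cases h : seen.contains q.1
        · rfl
        · exact absurd h hseen
      have hf : (!seen.contains q.1) = true := by rw [hcf]; rfl
      by_cases hint : (PySem.Set.inter q.2 chain).isEmpty = true
      · have hcond : (!seen.contains q.1 && !(PySem.Set.inter q.2 chain).isEmpty) = false := by
          rw [hint]; simp
        rw [hcond]
        simp only [Bool.false_eq_true, if_false]
        rw [ih hNr chain seen]
        rw [List.filter_cons, hf]
        simp only [if_true]
        have hcond2 : (!(PySem.Set.inter q.2 chain).isEmpty) = false := by rw [hint]; rfl
        simp only [pvAbsorb, pvAbsNames, hcond2, Bool.false_eq_true, if_false]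
      · have hint' : (!(PySem.Set.inter q.2 chain).isEmpty) = true := by simp [hint]
        have hcond : (!seen.contains q.1 && !(PySem.Set.inter q.2 chain).isEmpty) = true := by
          rw [hcf, hint']; rfl
        rw [hcond]
        simp only [if_true]
        rw [List.filter_cons, hf]
        simp only [if_true]
        rw [ih hNr (PySem.Set.union chain q.2) (seen ++ [q.1])]
        have hfe : r.filter (fun p => !((seen ++ [q.1]).contains p.1))
            = r.filter (fun p => !seen.contains p.1) := by
          refine List.filter_congr ?_
          intro p hp
          have hne : p.1 ≠ q.1 := fun he => hq (he ▸ List.mem_map_of_mem hp)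
          simp [hne]
        rw [hfe]
        simp only [pvAbsorb, pvAbsNames, if_pos hint']
        rw [List.append_assoc]
        simp

theorem pvFilter_append (l : List (String × List String)) (s1 s2 : List String) :
    l.filter (fun q => !((s1 ++ s2).contains q.1))
      = (l.filter (fun q => !s1.contains q.1)).filter (fun q => !(s2.contains q.1)) := by
  rw [List.filter_filter]
  refine List.filter_congr ?_
  intro a _
  rw [List.contains_append]
  cases s1.contains a.1 <;> cases s2.contains a.1 <;> rfl

theorem pvOuter_spec (L : List (String × List String)) (hN : (L.map Prod.fst).Nodup) :
    ∀ (L₂ : List (String × List String)) (seen : List String)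
      (d : PySem.Dict String (List String)),
    L₂.filter (fun q => !seen.contains q.1) = L.filter (fun q => !seen.contains q.1) →
    (∀ k ∈ d.keys, k ∈ seen) →
    (L₂.foldl (pvPassStep L) (seen, d)).2.items
      = d.items ++ pvMergePass (L₂.filter (fun q => !seen.contains q.1)) := by
  intro L₂
  induction L₂ with
  | nil =>
    intro seen d hfil hkeys
    simp [pvMergePass]
  | cons p t ih =>
    intro seen d hfil hkeys
    simp only [List.foldl_cons]
    by_cases hp : seen.contains p.1 = true
    · have hstep : pvPassStep L (seen, d) p = (seen, d) := by
        unfold pvPassStep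
        rw [if_pos hp]
      rw [hstep]
      have hf : (!seen.contains p.1) = false := by rw [hp]; rfl
      have hfil' : t.filter (fun q => !seen.contains q.1)
          = L.filter (fun q => !seen.contains q.1) := by
        rw [← hfil, List.filter_cons, hf]
        simp
      rw [List.filter_cons, hf]
      simp only [Bool.false_eq_true, if_false]
      exact ih seen d hfil' hkeys
    · have hsm : p.1 ∉ seen := fun hm => hp (List.contains_iff_mem.mpr hm)
      have hcf : seen.contains p.1 = false := by
        cases h : seen.contains p.1
        · rfl
        · exact absurd h hp
      have hf : (!seen.contains p.1) = true := by rw [hcf]; rfl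
      have hstep : pvPassStep L (seen, d) p
          = ((pvInner L p.2 (seen ++ [p.1])).2,
             d.insert p.1 (pvInner L p.2 (seen ++ [p.1])).1) := by
        unfold pvPassStep
        rw [if_neg hp]
      rw [hstep]
      have hLf : L.filter (fun q => !seen.contains q.1)
          = p :: t.filter (fun q => !seen.contains q.1) := by
        rw [← hfil, List.filter_cons, hf]
        simp
      have hLnames : ((L.filter (fun q => !seen.contains q.1)).map Prod.fst).Nodup :=
        (List.Sublist.map Prod.fst List.filter_sublist).nodup hN
      have hpn : p.1 ∉ (t.filter (fun q => !seen.contains q.1)).map Prod.fst := by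
        rw [hLf] at hLnames
        simp only [List.map_cons, List.nodup_cons] at hLnames
        exact hLnames.1
      have hrestnames : ((t.filter (fun q => !seen.contains q.1)).map Prod.fst).Nodup := by
        rw [hLf] at hLnames
        simp only [List.map_cons, List.nodup_cons] at hLnames
        exact hLnames.2
      have hrestid : (t.filter (fun q => !seen.contains q.1)).filter
          (fun q => !([p.1].contains q.1)) = t.filter (fun q => !seen.contains q.1) := by
        refine List.filter_eq_self.mpr ?_
        intro q hq
        have hne : q.1 ≠ p.1 := fun he => hpn (he ▸ List.mem_map_of_mem hq)
        simp [hne]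
      have hstep2 : L.filter (fun q => !((seen ++ [p.1]).contains q.1))
          = t.filter (fun q => !seen.contains q.1) := by
        rw [pvFilter_append, hLf, List.filter_cons]
        have hh : (!([p.1].contains p.1)) = false := by simp
        rw [hh]
        simp only [Bool.false_eq_true, if_false]
        exact hrestid
      have hspec := pvInner_spec L hN p.2 (seen ++ [p.1])
      rw [hstep2] at hspec
      have hdc : d.contains p.1 = false := by
        cases hck : d.contains p.1
        · rfl
        · exact absurd (hkeys _ ((PySem.Dict.contains_iff_mem_keys d p.1).mp hck)) hsm
      have hins : (d.insert p.1 (pvInner L p.2 (seen ++ [p.1])).1).items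
          = d.items ++ [(p.1, (pvAbsorb p.2 (t.filter (fun q => !seen.contains q.1))).1)] := by
        rw [PySem.Dict.items_insert_of_not_contains d _ hdc, hspec]
      have hseen2 : (pvInner L p.2 (seen ++ [p.1])).2
          = (seen ++ [p.1]) ++ pvAbsNames p.2 (t.filter (fun q => !seen.contains q.1)) := by
        rw [hspec]
      have hL2 : L.filter (fun q =>
            !(((seen ++ [p.1]) ++ pvAbsNames p.2 (t.filter (fun q => !seen.contains q.1))).contains q.1))
          = (t.filter (fun q => !seen.contains q.1)).filter
            (fun q => !((pvAbsNames p.2 (t.filter (fun q => !seen.contains q.1))).contains q.1)) := by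
        rw [pvFilter_append L (seen ++ [p.1]) _, hstep2]
      have hT2 : t.filter (fun q =>
            !(((seen ++ [p.1]) ++ pvAbsNames p.2 (t.filter (fun q => !seen.contains q.1))).contains q.1))
          = (t.filter (fun q => !seen.contains q.1)).filter
            (fun q => !((pvAbsNames p.2 (t.filter (fun q => !seen.contains q.1))).contains q.1)) := by
        rw [pvFilter_append t (seen ++ [p.1]) _]
        congr 1
        rw [pvFilter_append t seen [p.1], hrestid]
      have hfil2 : t.filter (fun q =>
            !(((seen ++ [p.1]) ++ pvAbsNames p.2 (t.filter (fun q => !seen.contains q.1))).contains q.1))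
          = L.filter (fun q =>
            !(((seen ++ [p.1]) ++ pvAbsNames p.2 (t.filter (fun q => !seen.contains q.1))).contains q.1)) :=
        hT2.trans hL2.symm
      have hkeys2 : ∀ k ∈ (d.insert p.1 (pvInner L p.2 (seen ++ [p.1])).1).keys,
          k ∈ (seen ++ [p.1]) ++ pvAbsNames p.2 (t.filter (fun q => !seen.contains q.1)) := by
        intro k hk
        rw [PySem.Dict.keys_insert_of_not_contains d _ hdc] at hk
        rcases List.mem_append.mp hk with hk | hk
        · exact List.mem_append.mpr (Or.inl (List.mem_append.mpr (Or.inl (hkeys _ hk))))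
        · exact List.mem_append.mpr (Or.inl (List.mem_append.mpr (Or.inr hk)))
      have hih := ih ((seen ++ [p.1]) ++ pvAbsNames p.2 (t.filter (fun q => !seen.contains q.1)))
        (d.insert p.1 (pvInner L p.2 (seen ++ [p.1])).1) hfil2 hkeys2
      rw [hseen2, hih, hins]
      rw [List.filter_cons, hf]
      simp only [if_true]
      rw [pvMergePass]
      rw [pvAbsorb_kept_eq_filter _ _ hrestnames, hT2]
      simp

theorem pvPass_items (tc : PySem.Dict String (List String)) (h : tc.keys.Nodup) :
    (pvPass tc).items = pvMergePass tc.items := by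
  have hN : (tc.items.map Prod.fst).Nodup := h
  have h0 : tc.items.filter (fun q => !(([] : List String)).contains q.1) = tc.items :=
    List.filter_eq_self.mpr (fun a _ => rfl)
  have hout := pvOuter_spec tc.items hN tc.items [] PySem.Dict.empty rfl (by intro k hk; simp at hk)
  rw [h0] at hout
  unfold pvPass
  rw [hout]
  rw [show (PySem.Dict.empty : PySem.Dict String (List String)).items = [] from rfl,
    List.nil_append]

-- ---- structural properties of one pass ----

theorem pvMergePass_length_le (l : List (String × List String)) :
    (pvMergePass l).length ≤ l.length := by
  induction l using pvMergePass.induct with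
  | case1 => simp [pvMergePass]
  | case2 p r ih =>
    rw [pvMergePass]
    simp only [List.length_cons]
    have h1 := (pvAbsorb_kept_sublist p.2 r).length_le
    omega

theorem pvAbsorb_eq_of_length (chain : List String) (r : List (String × List String))
    (h : (pvAbsorb chain r).2.length = r.length) :
    pvAbsorb chain r = (chain, r) ∧ ∀ q ∈ r, Disjoint q.2.toFinset chain.toFinset := by
  induction r generalizing chain with
  | nil => exact ⟨by simp [pvAbsorb], by simp⟩
  | cons q r ih =>
    by_cases hint : (!(PySem.Set.inter q.2 chain).isEmpty) = true
    · exfalso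
      simp only [pvAbsorb, if_pos hint] at h
      have hle := (pvAbsorb_kept_sublist (PySem.Set.union chain q.2) r).length_le
      simp only [List.length_cons] at h
      omega
    · simp only [pvAbsorb, if_neg hint] at h ⊢
      simp only [List.length_cons] at h
      obtain ⟨h1, h2⟩ := ih chain (by omega)
      constructor
      · rw [h1]
      · intro q' hq'
        rcases List.mem_cons.mp hq' with rfl | hm
        · have hie : (PySem.Set.inter q'.2 chain).isEmpty = true := by
            cases hc : (PySem.Set.inter q'.2 chain).isEmpty
            · rw [hc] at hint
              exact absurd rfl hint
            · rfl
          exact (pvInterEmpty_iff _ _).mp hie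
        · exact h2 q' hm

theorem pvMergePass_eq_of_length (l : List (String × List String))
    (h : (pvMergePass l).length = l.length) :
    pvMergePass l = l ∧ (l.map (fun q => q.2.toFinset)).Pairwise (fun a b => Disjoint a b) := by
  induction l using pvMergePass.induct with
  | case1 => exact ⟨by rw [pvMergePass], by simp⟩
  | case2 p r ih =>
    rw [pvMergePass] at h ⊢
    simp only [List.length_cons] at h
    have hk := (pvAbsorb_kept_sublist p.2 r).length_le
    have hmp := pvMergePass_length_le (pvAbsorb p.2 r).2
    have hkl : (pvAbsorb p.2 r).2.length = r.length := by omega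
    obtain ⟨ha, hdisj⟩ := pvAbsorb_eq_of_length p.2 r hkl
    have hlen2 : (pvMergePass (pvAbsorb p.2 r).2).length = (pvAbsorb p.2 r).2.length := by
      rw [hkl]
      omega
    obtain ⟨ih1, ih2⟩ := ih hlen2
    rw [ha] at ih1 ih2 ⊢
    simp only at ih1 ih2 ⊢
    constructor
    · rw [ih1]
    · rw [List.map_cons, List.pairwise_cons]
      refine ⟨?_, ih2⟩
      intro b hb
      obtain ⟨q, hq, rfl⟩ := List.mem_map.mp hb
      exact (hdisj q hq).symm

theorem pvAbsorb_chain_nodup (chain : List String) (r : List (String × List String))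
    (h : chain.Nodup) : (pvAbsorb chain r).1.Nodup := by
  induction r generalizing chain with
  | nil => simpa [pvAbsorb] using h
  | cons q r ih =>
    by_cases hint : (!(PySem.Set.inter q.2 chain).isEmpty) = true
    · simp only [pvAbsorb, if_pos hint]
      exact ih _ (PySem.Set.nodup_union _ _ h)
    · simp only [pvAbsorb, if_neg hint]
      exact ih chain h

theorem pvAbsorb_chain_conn {F : List (Finset String)} (chain : List String)
    (r : List (String × List String)) (h1 : pvConn F chain.toFinset)
    (h2 : ∀ q ∈ r, pvConn F q.2.toFinset) : pvConn F (pvAbsorb chain r).1.toFinset := by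
  induction r generalizing chain with
  | nil => simpa [pvAbsorb] using h1
  | cons q r ih =>
    by_cases hint : (!(PySem.Set.inter q.2 chain).isEmpty) = true
    · simp only [pvAbsorb, if_pos hint]
      refine ih _ ?_ (fun q' hq' => h2 q' (List.mem_cons_of_mem _ hq'))
      rw [pvUnion_toFinset]
      refine pvConn.merge h1 (h2 q (List.mem_cons_self ..)) ?_
      have hne : PySem.Set.inter q.2 chain ≠ [] := by
        intro hc
        simp [hc] at hint
      obtain ⟨x, hx⟩ := List.exists_mem_of_ne_nil _ hne
      rw [PySem.Set.mem_inter] at hx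
      exact ⟨x, Finset.mem_inter.mpr ⟨List.mem_toFinset.mpr hx.2, List.mem_toFinset.mpr hx.1⟩⟩
    · simp only [pvAbsorb, if_neg hint]
      exact ih chain h1 (fun q' hq' => h2 q' (List.mem_cons_of_mem _ hq'))

theorem pvAbsorb_chain_superset (chain : List String) (r : List (String × List String)) :
    ∀ x ∈ chain, x ∈ (pvAbsorb chain r).1 := by
  induction r generalizing chain with
  | nil => intro x hx; simpa [pvAbsorb] using hx
  | cons q r ih =>
    intro x hx
    by_cases hint : (!(PySem.Set.inter q.2 chain).isEmpty) = true
    · simp only [pvAbsorb, if_pos hint]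
      exact ih _ x ((PySem.Set.mem_union _ _ x).mpr (Or.inl hx))
    · simp only [pvAbsorb, if_neg hint]
      exact ih chain x hx

theorem pvAbsorb_cover (chain : List String) (r : List (String × List String)) :
    ∀ q ∈ r, (∀ x ∈ q.2, x ∈ (pvAbsorb chain r).1) ∨ q ∈ (pvAbsorb chain r).2 := by
  induction r generalizing chain with
  | nil => intro q hq; cases hq
  | cons q' r ih =>
    intro q hq
    by_cases hint : (!(PySem.Set.inter q'.2 chain).isEmpty) = true
    · simp only [pvAbsorb, if_pos hint]
      rcases List.mem_cons.mp hq with rfl | hm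
      · left
        intro x hx
        exact pvAbsorb_chain_superset _ r x ((PySem.Set.mem_union _ _ x).mpr (Or.inr hx))
      · exact ih _ q hm
    · simp only [pvAbsorb, if_neg hint]
      rcases List.mem_cons.mp hq with rfl | hm
      · right
        exact List.mem_cons_self ..
      · rcases ih chain q hm with hl | hr
        · exact Or.inl hl
        · exact Or.inr (List.mem_cons_of_mem _ hr)

theorem pvMergePass_names_sublist (l : List (String × List String)) :
    ((pvMergePass l).map Prod.fst).Sublist (l.map Prod.fst) := by
  induction l using pvMergePass.induct with
  | case1 => simp [pvMergePass]
  | case2 p r ih =>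
    rw [pvMergePass]
    simp only [List.map_cons]
    exact (ih.trans (List.Sublist.map Prod.fst (pvAbsorb_kept_sublist p.2 r))).cons₂ p.1

theorem pvMergePass_nodup (l : List (String × List String)) (h : ∀ q ∈ l, q.2.Nodup) :
    ∀ q ∈ pvMergePass l, q.2.Nodup := by
  induction l using pvMergePass.induct with
  | case1 => intro q hq; rw [pvMergePass] at hq; cases hq
  | case2 p r ih =>
    intro q hq
    rw [pvMergePass] at hq
    rcases List.mem_cons.mp hq with rfl | hm
    · exact pvAbsorb_chain_nodup _ _ (h p (List.mem_cons_self ..))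
    · exact ih (fun q' hq' => h q' (List.mem_cons_of_mem _
        ((pvAbsorb_kept_sublist p.2 r).mem hq'))) q hm

theorem pvMergePass_conn {F : List (Finset String)} (l : List (String × List String))
    (h : ∀ q ∈ l, pvConn F q.2.toFinset) : ∀ q ∈ pvMergePass l, pvConn F q.2.toFinset := by
  induction l using pvMergePass.induct with
  | case1 => intro q hq; rw [pvMergePass] at hq; cases hq
  | case2 p r ih =>
    intro q hq
    rw [pvMergePass] at hq
    rcases List.mem_cons.mp hq with rfl | hm
    · exact pvAbsorb_chain_conn _ _ (h p (List.mem_cons_self ..))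
        (fun q' hq' => h q' (List.mem_cons_of_mem _ hq'))
    · exact ih (fun q' hq' => h q' (List.mem_cons_of_mem _
        ((pvAbsorb_kept_sublist p.2 r).mem hq'))) q hm

theorem pvMergePass_cover (l : List (String × List String)) :
    ∀ q ∈ l, ∃ q' ∈ pvMergePass l, ∀ x ∈ q.2, x ∈ q'.2 := by
  induction l using pvMergePass.induct with
  | case1 => intro q hq; cases hq
  | case2 p r ih =>
    intro q hq
    rcases List.mem_cons.mp hq with rfl | hm
    · exact ⟨(q.1, (pvAbsorb q.2 r).1), by rw [pvMergePass]; exact List.mem_cons_self ..,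
        fun x hx => pvAbsorb_chain_superset q.2 r x hx⟩
    · rcases pvAbsorb_cover p.2 r q hm with hl | hr
      · exact ⟨(p.1, (pvAbsorb p.2 r).1), by rw [pvMergePass]; exact List.mem_cons_self .., hl⟩
      · obtain ⟨q', hq', hsub⟩ := ih q hr
        exact ⟨q', by rw [pvMergePass]; exact List.mem_cons_of_mem _ hq', hsub⟩

-- ---- A's loop reaches a pvGood family ----

theorem pvLoop_good (F : List (Finset String)) :
    ∀ (tc : PySem.Dict String (List String)), tc.keys.Nodup →
    (∀ c ∈ tc.values, c.Nodup) → (∀ c ∈ tc.values, pvConn F c.toFinset) →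
    (∀ f ∈ F, ∃ c ∈ tc.values, f ⊆ c.toFinset) →
    ∃ V, pvGood F V ∧ pvLoop tc = pvSortOut V := by
  intro tc
  induction tc using pvLoop.induct with
  | case1 tc chains hsize =>
    simp only [chains] at hsize
    intro hk hn hc hcov
    have hitems : (pvPass tc).items = pvMergePass tc.items := pvPass_items tc hk
    have hlen : (pvMergePass tc.items).length = tc.items.length := by
      rw [← hitems]
      exact hsize
    obtain ⟨heq, hpair⟩ := pvMergePass_eq_of_length _ hlen
    have hitems2 : (pvPass tc).items = tc.items := hitems.trans heq
    have hval : (pvPass tc).values = tc.values := by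
      show (pvPass tc).items.map Prod.snd = tc.items.map Prod.snd
      rw [hitems2]
    refine ⟨(pvPass tc).values, ⟨?_, ?_, ?_, ?_⟩, ?_⟩
    · rw [hval]
      exact hn
    · rw [hval]
      exact hc
    · rw [hval]
      show ((tc.items.map Prod.snd).map (fun c => c.toFinset)).Pairwise _
      rw [List.map_map]
      exact hpair
    · intro f hf
      obtain ⟨c, hcm, hsub⟩ := hcov f hf
      refine ⟨c, ?_, hsub⟩
      rw [hval]
      exact hcm
    · rw [pvLoop]
      simp only [if_pos hsize]
  | case2 tc chains hsize ih =>
    simp only [chains] at hsize ih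
    intro hk hn hc hcov
    have hitems : (pvPass tc).items = pvMergePass tc.items := pvPass_items tc hk
    have hvm : (pvPass tc).values = (pvMergePass tc.items).map Prod.snd := by
      show (pvPass tc).items.map Prod.snd = _
      rw [hitems]
    have hvaltc : tc.values = tc.items.map Prod.snd := rfl
    have hk2 : (pvPass tc).keys.Nodup := by
      show ((pvPass tc).items.map Prod.fst).Nodup
      rw [hitems]
      exact (pvMergePass_names_sublist tc.items).nodup hk
    have hn2 : ∀ c ∈ (pvPass tc).values, c.Nodup := by
      intro c hcm
      rw [hvm] at hcm
      obtain ⟨q, hq, rfl⟩ := List.mem_map.mp hcm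
      exact pvMergePass_nodup tc.items
        (fun q' hq' => hn _ (by rw [hvaltc]; exact List.mem_map_of_mem hq')) q hq
    have hc2 : ∀ c ∈ (pvPass tc).values, pvConn F c.toFinset := by
      intro c hcm
      rw [hvm] at hcm
      obtain ⟨q, hq, rfl⟩ := List.mem_map.mp hcm
      exact pvMergePass_conn tc.items
        (fun q' hq' => hc _ (by rw [hvaltc]; exact List.mem_map_of_mem hq')) q hq
    have hcov2 : ∀ f ∈ F, ∃ c ∈ (pvPass tc).values, f ⊆ c.toFinset := by
      intro f hf
      obtain ⟨c, hcm, hsub⟩ := hcov f hf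
      rw [hvaltc] at hcm
      obtain ⟨q, hq, rfl⟩ := List.mem_map.mp hcm
      obtain ⟨q', hq', hss⟩ := pvMergePass_cover tc.items q hq
      refine ⟨q'.2, ?_, ?_⟩
      · rw [hvm]
        exact List.mem_map_of_mem hq'
      · intro x hx
        exact List.mem_toFinset.mpr (hss x (List.mem_toFinset.mp (hsub hx)))
    obtain ⟨V, hgood, heq⟩ := ih hk2 hn2 hc2 hcov2
    refine ⟨V, hgood, ?_⟩
    rw [pvLoop]
    simp only [if_neg hsize]
    exact heq

-- ---- B's single pass reaches a pvGood family ----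

theorem pvFoldUnion_mem (ts : List (List String)) (acc : List String) :
    ∀ x, x ∈ ts.foldl (fun a c => PySem.Set.union a c) acc ↔ x ∈ acc ∨ ∃ c ∈ ts, x ∈ c := by
  intro x
  induction ts generalizing acc with
  | nil => simp
  | cons c ts ih =>
    simp only [List.foldl_cons]
    rw [ih]
    simp only [PySem.Set.mem_union, List.mem_cons]
    constructor
    · rintro ((h | h) | ⟨c', hc', hx⟩)
      · exact Or.inl h
      · exact Or.inr ⟨c, Or.inl rfl, h⟩
      · exact Or.inr ⟨c', Or.inr hc', hx⟩
    · rintro (h | ⟨c', (rfl | hc'), hx⟩)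
      · exact Or.inl (Or.inl h)
      · exact Or.inl (Or.inr hx)
      · exact Or.inr ⟨c', hc', hx⟩

theorem pvFoldUnion_nodup (ts : List (List String)) (acc : List String) (h : acc.Nodup) :
    (ts.foldl (fun a c => PySem.Set.union a c) acc).Nodup := by
  induction ts generalizing acc with
  | nil => exact h
  | cons c ts ih => exact ih _ (PySem.Set.nodup_union _ _ h)

theorem pvFoldUnion_conn {F : List (Finset String)} (g : List String) :
    ∀ (ts : List (List String)) (acc : List String),
    pvConn F acc.toFinset → (∀ x ∈ g, x ∈ acc) →
    (∀ c ∈ ts, pvConn F c.toFinset ∧ ¬ (PySem.Set.inter c g).isEmpty = true) →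
    pvConn F (ts.foldl (fun a c => PySem.Set.union a c) acc).toFinset := by
  intro ts
  induction ts with
  | nil => intro acc h1 h2 h3; exact h1
  | cons c ts ih =>
    intro acc h1 h2 h3
    simp only [List.foldl_cons]
    refine ih _ ?_ ?_ (fun c' hc' => h3 c' (List.mem_cons_of_mem _ hc'))
    · rw [pvUnion_toFinset]
      obtain ⟨hcc, hcg⟩ := h3 c (List.mem_cons_self ..)
      refine pvConn.merge h1 hcc ?_
      have hne : PySem.Set.inter c g ≠ [] := by
        intro hc0
        exact hcg (by rw [hc0]; rfl)
      obtain ⟨x, hx⟩ := List.exists_mem_of_ne_nil _ hne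
      rw [PySem.Set.mem_inter] at hx
      exact ⟨x, Finset.mem_inter.mpr ⟨List.mem_toFinset.mpr (h2 x hx.2), List.mem_toFinset.mpr hx.1⟩⟩
    · intro x hx
      exact (PySem.Set.mem_union _ _ x).mpr (Or.inl (h2 x hx))

theorem pvMergeInto_good {F : List (Finset String)} (comps : List (List String)) (g : List String)
    (h1 : ∀ c ∈ comps, c.Nodup) (h2 : ∀ c ∈ comps, pvConn F c.toFinset)
    (h3 : (comps.map (fun c => c.toFinset)).Pairwise (fun a b => Disjoint a b))
    (hg1 : g.Nodup) (hg2 : pvConn F g.toFinset) :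
    (∀ c ∈ pvMergeInto comps g, c.Nodup) ∧ (∀ c ∈ pvMergeInto comps g, pvConn F c.toFinset) ∧
    ((pvMergeInto comps g).map (fun c => c.toFinset)).Pairwise (fun a b => Disjoint a b) ∧
    (∀ c ∈ comps, ∃ c' ∈ pvMergeInto comps g, ∀ x ∈ c, x ∈ c') ∧
    (∃ c' ∈ pvMergeInto comps g, ∀ x ∈ g, x ∈ c') := by
  simp only [pvMergeInto]
  set T := comps.filter (fun c => !(PySem.Set.inter c g).isEmpty) with hT
  set R := comps.filter (fun c => (PySem.Set.inter c g).isEmpty) with hR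
  set M := T.foldl (fun a c => PySem.Set.union a c) g with hM
  have hmemM := pvFoldUnion_mem T g
  have hTm : ∀ c ∈ T, c ∈ comps := fun c hc => (List.mem_filter.mp hc).1
  have hRm : ∀ c ∈ R, c ∈ comps := fun c hc => (List.mem_filter.mp hc).1
  have hTd : ∀ c ∈ T, ¬ (PySem.Set.inter c g).isEmpty = true := by
    intro c hc hcc
    have h := (List.mem_filter.mp hc).2
    rw [hcc] at h
    cases h
  have hRd : ∀ c ∈ R, Disjoint c.toFinset g.toFinset := by
    intro c hc
    exact (pvInterEmpty_iff _ _).mp (List.mem_filter.mp hc).2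
  have hMnodup : M.Nodup := pvFoldUnion_nodup T g hg1
  have hMconn : pvConn F M.toFinset := pvFoldUnion_conn g T g hg2 (fun x hx => hx)
      (fun c hc => ⟨h2 c (hTm c hc), hTd c hc⟩)
  have hgM : ∀ x ∈ g, x ∈ M := fun x hx => (hmemM x).mpr (Or.inl hx)
  have hTM : ∀ c ∈ T, ∀ x ∈ c, x ∈ M := fun c hc x hx => (hmemM x).mpr (Or.inr ⟨c, hc, hx⟩)
  have hdisjRM : ∀ c ∈ R, Disjoint c.toFinset M.toFinset := by
    intro c hc
    rw [Finset.disjoint_left]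
    intro x hxc hxM
    rw [List.mem_toFinset] at hxc hxM
    rcases (hmemM x).mp hxM with hxg | ⟨c', hc', hxc'⟩
    · exact (Finset.disjoint_left.mp (hRd c hc)) (List.mem_toFinset.mpr hxc)
        (List.mem_toFinset.mpr hxg)
    · have hdj : Disjoint c.toFinset c'.toFinset := by
        by_contra hnd
        have heqf := pvDisjoint_eq h3 (List.mem_map_of_mem (hRm c hc))
          (List.mem_map_of_mem (hTm c' hc')) hnd
        have hnee : PySem.Set.inter c' g ≠ [] := fun h0 => hTd c' hc' (by rw [h0]; rfl)
        obtain ⟨y, hy⟩ := List.exists_mem_of_ne_nil _ hnee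
        rw [PySem.Set.mem_inter] at hy
        have hyc : y ∈ c.toFinset := by
          rw [heqf]
          exact List.mem_toFinset.mpr hy.1
        exact (Finset.disjoint_left.mp (hRd c hc)) hyc (List.mem_toFinset.mpr hy.2)
      exact (Finset.disjoint_left.mp hdj) (List.mem_toFinset.mpr hxc) (List.mem_toFinset.mpr hxc')
  refine ⟨?_, ?_, ?_, ?_, ?_⟩
  · intro c hc
    rcases List.mem_append.mp hc with hcm | hcm
    · exact h1 c (hRm c hcm)
    · rw [List.mem_singleton] at hcm
      subst hcm
      exact hMnodup
  · intro c hc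
    rcases List.mem_append.mp hc with hcm | hcm
    · exact h2 c (hRm c hcm)
    · rw [List.mem_singleton] at hcm
      subst hcm
      exact hMconn
  · rw [List.map_append, List.pairwise_append]
    refine ⟨h3.sublist (List.Sublist.map _ List.filter_sublist), by simp, ?_⟩
    intro a ha b hb
    rw [List.map_singleton, List.mem_singleton] at hb
    subst hb
    obtain ⟨c, hc, rfl⟩ := List.mem_map.mp ha
    exact hdisjRM c hc
  · intro c hc
    by_cases hie : (PySem.Set.inter c g).isEmpty = true
    · exact ⟨c, List.mem_append.mpr (Or.inl (List.mem_filter.mpr ⟨hc, hie⟩)), fun x hx => hx⟩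
    · have hcT : c ∈ T := List.mem_filter.mpr ⟨hc, by
        cases h : (PySem.Set.inter c g).isEmpty
        · rfl
        · exact absurd h hie⟩
      exact ⟨M, List.mem_append.mpr (Or.inr (List.mem_singleton.mpr rfl)), hTM c hcT⟩
  · exact ⟨M, List.mem_append.mpr (Or.inr (List.mem_singleton.mpr rfl)), hgM⟩

theorem pvFoldB_good {F : List (Finset String)} (ex : List String) :
    ∀ (L : List (String × List String)) (comps : List (List String)),
    (∀ c ∈ comps, c.Nodup) → (∀ c ∈ comps, pvConn F c.toFinset) →
    ((comps.map (fun c => c.toFinset)).Pairwise (fun a b => Disjoint a b)) →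
    (∀ p ∈ L, ex.contains p.1 = false → pvConn F (pvGroup ex p).toFinset) →
    ((∀ c ∈ L.foldl (fun comps p => if ex.contains p.1 then comps else pvMergeInto comps (pvGroup ex p)) comps, c.Nodup) ∧
     (∀ c ∈ L.foldl (fun comps p => if ex.contains p.1 then comps else pvMergeInto comps (pvGroup ex p)) comps, pvConn F c.toFinset) ∧
     ((L.foldl (fun comps p => if ex.contains p.1 then comps else pvMergeInto comps (pvGroup ex p)) comps).map (fun c => c.toFinset)).Pairwise (fun a b => Disjoint a b) ∧
     (∀ c ∈ comps, ∃ c' ∈ L.foldl (fun comps p => if ex.contains p.1 then comps else pvMergeInto comps (pvGroup ex p)) comps, ∀ x ∈ c, x ∈ c') ∧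
     (∀ p ∈ L, ex.contains p.1 = false →
       ∃ c' ∈ L.foldl (fun comps p => if ex.contains p.1 then comps else pvMergeInto comps (pvGroup ex p)) comps, ∀ x ∈ pvGroup ex p, x ∈ c')) := by
  intro L
  induction L with
  | nil =>
    intro comps hn hc hd hgrp
    exact ⟨hn, hc, hd, fun c hcm => ⟨c, hcm, fun x hx => hx⟩, by simp⟩
  | cons p t ih =>
    intro comps hn hc hd hgrp
    simp only [List.foldl_cons]
    by_cases hex : ex.contains p.1 = true
    · rw [if_pos hex]
      obtain ⟨a1, a2, a3, a4, a5⟩ := ih comps hn hc hd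
        (fun p' hp' => hgrp p' (List.mem_cons_of_mem _ hp'))
      refine ⟨a1, a2, a3, a4, ?_⟩
      intro p' hp' hex'
      rcases List.mem_cons.mp hp' with rfl | hm
      · rw [hex] at hex'
        cases hex'
      · exact a5 p' hm hex'
    · rw [if_neg hex]
      have hexf : ex.contains p.1 = false := by
        cases h : ex.contains p.1
        · rfl
        · exact absurd h hex
      obtain ⟨b1, b2, b3, b4, b5⟩ := pvMergeInto_good comps (pvGroup ex p) hn hc hd
        (PySem.Set.nodup_ofList _) (hgrp p (List.mem_cons_self ..) hexf)
      obtain ⟨a1, a2, a3, a4, a5⟩ := ih _ b1 b2 b3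
        (fun p' hp' => hgrp p' (List.mem_cons_of_mem _ hp'))
      refine ⟨a1, a2, a3, ?_, ?_⟩
      · intro c hcm
        obtain ⟨c', hc', hsub⟩ := b4 c hcm
        obtain ⟨c'', hc'', hsub2⟩ := a4 c' hc'
        exact ⟨c'', hc'', fun x hx => hsub2 x (hsub x hx)⟩
      · intro p' hp' hex'
        rcases List.mem_cons.mp hp' with rfl | hm
        · obtain ⟨c', hc', hsub⟩ := b5
          obtain ⟨c'', hc'', hsub2⟩ := a4 c' hc'
          exact ⟨c'', hc'', fun x hx => hsub2 x (hsub x hx)⟩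
        · exact a5 p' hm hex'

-- ---- assembling the two sides ----

theorem pvTemp_items (ex : List String) (items : List (String × List String))
    (h : (items.map Prod.fst).Nodup) :
    (pvTemp ex items).items
      = (items.filter (fun p => !ex.contains p.1)).map (fun p => (p.1, pvGroup ex p)) := by
  have hnames : (((items.filter (fun p => !ex.contains p.1)).map
      (fun p => (p.1, pvGroup ex p))).map Prod.fst).Nodup := by
    rw [List.map_map]
    exact (List.Sublist.map _ List.filter_sublist).nodup h
  have hfresh : ∀ a ∈ (items.filter (fun p => !ex.contains p.1)).map
      (fun p => (p.1, pvGroup ex p)), (PySem.Dict.empty :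
        PySem.Dict String (List String)).contains a.1 = false := fun a _ => rfl
  have hmain := PySem.Dict.items_foldl_insert_fresh
    ((items.filter (fun p => !ex.contains p.1)).map (fun p => (p.1, pvGroup ex p)))
    Prod.fst Prod.snd PySem.Dict.empty hfresh hnames
  show (List.foldl (fun d a => d.insert a.1 a.2) PySem.Dict.empty
    ((items.filter (fun p => !ex.contains p.1)).map (fun p => (p.1, pvGroup ex p)))).items = _
  rw [hmain]
  rw [show (PySem.Dict.empty : PySem.Dict String (List String)).items = [] from rfl,
    List.nil_append, List.map_map]
  exact List.map_congr_left (fun a _ => rfl)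

theorem pvItems_names_nodup (dm : List (String × List String)) :
    ((pvItems dm).map Prod.fst).Nodup := by
  exact PySem.Dict.nodup_keys_ofList dm

-- ===== VERDICT (by name: the statement is the Claim_ definition above) =====
theorem get_parallel_chains_spec : Claim_equal_get_parallel_chains := by
  unfold Claim_equal_get_parallel_chains
  intro dm exclude _
  unfold Spec_get_parallel_chains
  unfold get_parallel_chains get_parallel_chains_alt
  set ex := exclude.getD [] with hex
  set items := pvItems dm with hitems
  have hNames : (items.map Prod.fst).Nodup := pvItems_names_nodup dm
  set l := (items.filter (fun p => !ex.contains p.1)).map (fun p => (p.1, pvGroup ex p)) with hl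
  set F := l.map (fun q => q.2.toFinset) with hF
  have hti : (pvTemp ex items).items = l := pvTemp_items ex items hNames
  have htk : (pvTemp ex items).keys.Nodup := by
    show ((pvTemp ex items).items.map Prod.fst).Nodup
    rw [hti, hl, List.map_map]
    exact (List.Sublist.map _ List.filter_sublist).nodup hNames
  have htv : (pvTemp ex items).values = l.map Prod.snd := by
    show (pvTemp ex items).items.map Prod.snd = _
    rw [hti]
  have hne : ∀ f ∈ F, f.Nonempty := by
    intro f hf
    rw [hF] at hf
    obtain ⟨q, hq, rfl⟩ := List.mem_map.mp hf
    rw [hl] at hq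
    obtain ⟨p, hp, rfl⟩ := List.mem_map.mp hq
    refine ⟨p.1, ?_⟩
    rw [List.mem_toFinset]
    exact (PySem.Set.mem_ofList _ _).mpr (List.mem_cons_self ..)
  have hvn : ∀ c ∈ (pvTemp ex items).values, c.Nodup := by
    intro c hcm
    rw [htv] at hcm
    obtain ⟨q, hq, rfl⟩ := List.mem_map.mp hcm
    rw [hl] at hq
    obtain ⟨p, hp, rfl⟩ := List.mem_map.mp hq
    exact PySem.Set.nodup_ofList _
  have hvc : ∀ c ∈ (pvTemp ex items).values, pvConn F c.toFinset := by
    intro c hcm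
    rw [htv] at hcm
    obtain ⟨q, hq, rfl⟩ := List.mem_map.mp hcm
    exact pvConn.base (by rw [hF]; exact List.mem_map_of_mem hq)
  have hvcov : ∀ f ∈ F, ∃ c ∈ (pvTemp ex items).values, f ⊆ c.toFinset := by
    intro f hf
    rw [hF] at hf
    obtain ⟨q, hq, rfl⟩ := List.mem_map.mp hf
    refine ⟨q.2, ?_, fun x hx => hx⟩
    rw [htv]
    exact List.mem_map_of_mem hq
  obtain ⟨V, hVgood, hVeq⟩ := pvLoop_good F (pvTemp ex items) htk hvn hvc hvcov
  have hgrp : ∀ p ∈ items, ex.contains p.1 = false → pvConn F (pvGroup ex p).toFinset := by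
    intro p hp hexf
    refine pvConn.base ?_
    rw [hF, hl, List.map_map]
    exact List.mem_map.mpr ⟨p, List.mem_filter.mpr ⟨hp, by rw [hexf]; rfl⟩, rfl⟩
  obtain ⟨c1, c2, c3, c4, c5⟩ := pvFoldB_good (F := F) ex items [] (by intro c hc; cases hc)
      (by intro c hc; cases hc) (by simp) hgrp
  have hBgood : pvGood F (items.foldl
      (fun comps p => if ex.contains p.1 then comps else pvMergeInto comps (pvGroup ex p)) []) := by
    refine ⟨c1, c2, c3, ?_⟩
    intro f hf
    rw [hF] at hf
    obtain ⟨q, hq, rfl⟩ := List.mem_map.mp hf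
    rw [hl] at hq
    obtain ⟨p, hp, rfl⟩ := List.mem_map.mp hq
    obtain ⟨hpmem, hpex⟩ := List.mem_filter.mp hp
    have hexf : ex.contains p.1 = false := by
      cases h : ex.contains p.1
      · rfl
      · rw [h] at hpex
        cases hpex
    obtain ⟨c', hc', hsub⟩ := c5 p hpmem hexf
    exact ⟨c', hc', fun x hx => List.mem_toFinset.mpr (hsub x (List.mem_toFinset.mp hx))⟩
  rw [hVeq]
  exact pvSortOut_eq_of_good F hne V _ hVgood hBgood
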